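-- pv_equiv track=rewrite | github.com/IamTrollFace555/project-euler | old_solutions/PE_90.py | check_dice
-- ===== SOURCE A (Python) =====
-- def check_dice(dice1:set, dice2:set, conds=8) -> bool:
--
--     pairs = [(0, 1), (0, 4), (0, 6), (1, 6), (2, 5), (3, 6), (4, 6), (8, 1)][:conds]
--
--     for a, b in pairs:
--
--         if not ((a in dice1 and b in dice2) or (b in dice1 and a in dice2)):
--
--             if b == 6:
--                 b = 9
--                 if not ((a in dice1 and 9 in dice2) or (9 in dice1 and a in dice2)):
--                     return False
--
--             else:
--                 return False
--
--     return True
-- ===== SOURCE B (Python) =====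
-- def check_dice(dice1: set, dice2: set, conds=8) -> bool:
--     # Fold the 6/9 equivalence into the data: normalized copies where 9 counts as 6.
--     d1 = {6 if x == 9 else x for x in dice1}
--     d2 = {6 if x == 9 else x for x in dice2}
--     pairs = [(0, 1), (0, 4), (0, 6), (1, 6), (2, 5), (3, 6), (4, 6), (8, 1)][:conds]
--     return all((a in d1 and b in d2) or (b in d1 and a in d2) for a, b in pairs)
-- ===== Notes on version B (the rewrite author's own statement) =====
-- stated objective: simpler
-- what changed: B normalizes both dice up front (9 mapped to 6) so the nested 6/9 fallback branch disappears and the loop is a single plain all() over the symmetric membership test.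
import Mathlib
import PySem

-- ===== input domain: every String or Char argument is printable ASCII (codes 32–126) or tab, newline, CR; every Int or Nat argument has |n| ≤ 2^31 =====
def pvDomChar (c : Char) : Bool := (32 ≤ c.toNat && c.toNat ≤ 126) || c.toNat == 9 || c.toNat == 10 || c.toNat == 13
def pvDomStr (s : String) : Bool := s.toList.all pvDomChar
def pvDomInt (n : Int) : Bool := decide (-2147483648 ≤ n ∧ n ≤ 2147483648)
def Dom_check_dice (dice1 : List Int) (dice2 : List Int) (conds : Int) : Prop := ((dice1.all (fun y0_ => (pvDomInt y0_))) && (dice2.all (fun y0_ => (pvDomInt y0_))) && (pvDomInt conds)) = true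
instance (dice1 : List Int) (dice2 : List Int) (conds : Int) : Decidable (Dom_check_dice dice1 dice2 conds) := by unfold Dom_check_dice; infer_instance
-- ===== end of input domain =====

-- B normalizes both dice up front (9 counted as 6) and replaces A's nested 6/9
-- fallback branch by one plain all() over the symmetric membership test.

-- ===== PORT A =====
-- the literal pairs list of A
def pvPairs : List (Int × Int) := [(0, 1), (0, 4), (0, 6), (1, 6), (2, 5), (3, 6), (4, 6), (8, 1)]

-- A's for-loop with its early returns, step for step
def pvLoopA (dice1 dice2 : List Int) : List (Int × Int) → Bool
  | [] => true
  | (a, b) :: rest =>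
    if (dice1.contains a && dice2.contains b) || (dice1.contains b && dice2.contains a) then
      pvLoopA dice1 dice2 rest
    else
      if b == 6 then
        -- b = 9 rebinding; the retried test uses 9 literally as in A
        if (dice1.contains a && dice2.contains 9) || (dice1.contains 9 && dice2.contains a) then
          pvLoopA dice1 dice2 rest
        else false
      else false

def check_dice (dice1 : List Int) (dice2 : List Int) (conds : Int) : Bool :=
  pvLoopA dice1 dice2 (PySem.List.slice pvPairs none (some conds))

-- ===== PORT B =====
-- normalized copy: 9 counts as 6 (set comprehension; list of distinct elements)
def pvNorm (d : List Int) : List Int :=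
  PySem.Set.ofList (d.map (fun x => if x == 9 then 6 else x))

def check_dice_alt (dice1 : List Int) (dice2 : List Int) (conds : Int) : Bool :=
  let d1 := pvNorm dice1
  let d2 := pvNorm dice2
  (PySem.List.slice pvPairs none (some conds)).all
    (fun p => (d1.contains p.1 && d2.contains p.2) || (d1.contains p.2 && d2.contains p.1))

-- ===== PRECONDITION & SPEC =====
def Spec_check_dice (dice1 : List Int) (dice2 : List Int) (conds : Int) (out : Bool) : Prop := out = check_dice_alt dice1 dice2 conds
instance (dice1 : List Int) (dice2 : List Int) (conds : Int) (out : Bool) : Decidable (Spec_check_dice dice1 dice2 conds out) := by unfold Spec_check_dice; infer_instance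

-- ===== CLAIM (what is proved, stated in full; the proofs are below) =====
def Claim_equal_check_dice : Prop := ∀ (dice1 : List Int) (dice2 : List Int) (conds : Int), Dom_check_dice dice1 dice2 conds → Spec_check_dice dice1 dice2 conds (check_dice dice1 dice2 conds)

-- ===== LEMMAS AND PROOFS =====

-- membership in the normalized die
theorem mem_pvNorm (d : List Int) (x : Int) (hx : x ≠ 9) :
    x ∈ pvNorm d ↔ (x ∈ d ∨ (x = 6 ∧ 9 ∈ d)) := by
  simp only [pvNorm, PySem.Set.mem_ofList, List.mem_map]
  constructor
  · rintro ⟨v, hv, heq⟩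
    by_cases hv9 : v = 9
    · subst hv9; simp at heq; right; exact ⟨heq.symm, hv⟩
    · left
      have hvx : v = x := by simpa [hv9] using heq
      exact hvx ▸ hv
  · rintro (hxd | ⟨rfl, h9⟩)
    · exact ⟨x, hxd, by simp [hx]⟩
    · exact ⟨9, h9, by simp⟩

theorem contains_pvNorm (d : List Int) (x : Int) (hx : x ≠ 9) :
    (pvNorm d).contains x = (d.contains x || (decide (x = 6) && d.contains 9)) := by
  have h := mem_pvNorm d x hx
  by_cases h1 : x ∈ d <;> by_cases h2 : x = 6 <;> by_cases h3 : (9:Int) ∈ d <;>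
    simp_all

theorem pvLoopA_eq (dice1 dice2 : List Int) (ps : List (Int × Int))
    (h : ∀ p ∈ ps, p.1 ≠ 6 ∧ p.1 ≠ 9 ∧ p.2 ≠ 9) :
    pvLoopA dice1 dice2 ps =
      ps.all (fun p => ((pvNorm dice1).contains p.1 && (pvNorm dice2).contains p.2) ||
                       ((pvNorm dice1).contains p.2 && (pvNorm dice2).contains p.1)) := by
  induction ps with
  | nil => rfl
  | cons p rest ih =>
    obtain ⟨a, b⟩ := p
    obtain ⟨ha6, ha9, hb9⟩ := h _ (List.mem_cons_self ..)
    have hrest := ih (fun q hq => h q (List.mem_cons_of_mem _ hq))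
    have hna1 : (pvNorm dice1).contains a = dice1.contains a := by
      rw [contains_pvNorm _ _ ha9]; simp [ha6]
    have hna2 : (pvNorm dice2).contains a = dice2.contains a := by
      rw [contains_pvNorm _ _ ha9]; simp [ha6]
    by_cases hb6 : b = 6
    · subst hb6
      have hnb1 : (pvNorm dice1).contains 6 = (dice1.contains 6 || dice1.contains 9) := by
        rw [contains_pvNorm _ _ (by norm_num)]; simp
      have hnb2 : (pvNorm dice2).contains 6 = (dice2.contains 6 || dice2.contains 9) := by
        rw [contains_pvNorm _ _ (by norm_num)]; simp
      simp only [pvLoopA, List.all_cons, hrest, hna1, hna2, hnb1, hnb2]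
      cases dice1.contains a <;> cases dice2.contains a <;>
        cases dice1.contains 6 <;> cases dice2.contains 6 <;>
        cases dice1.contains 9 <;> cases dice2.contains 9 <;> simp
    · have hnb1 : (pvNorm dice1).contains b = dice1.contains b := by
        rw [contains_pvNorm _ _ hb9]; simp [hb6]
      have hnb2 : (pvNorm dice2).contains b = dice2.contains b := by
        rw [contains_pvNorm _ _ hb9]; simp [hb6]
      simp only [pvLoopA, List.all_cons, hrest, hna1, hna2, hnb1, hnb2,
        beq_iff_eq, if_neg hb6]
      cases ((dice1.contains a && dice2.contains b) || (dice1.contains b && dice2.contains a)) <;> simp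

-- ===== VERDICT (by name: the statement is the Claim_ definition above) =====
theorem check_dice_spec : Claim_equal_check_dice := by
  intro dice1 dice2 conds _
  unfold Spec_check_dice check_dice check_dice_alt
  apply pvLoopA_eq
  intro p hp
  have hmem : p ∈ pvPairs := PySem.List.mem_of_mem_slice _ _ _ hp
  simp only [pvPairs, List.mem_cons, List.not_mem_nil, or_false] at hmem
  rcases hmem with rfl|rfl|rfl|rfl|rfl|rfl|rfl|rfl <;> norm_num
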